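-- pv_equiv track=rewrite | github.com/AndrewSalah93/WallboxAssignment | UnitTesting_Part3.py | count_even_odd_0s_1s
-- ===== SOURCE A (Python) =====
-- def count_even_odd_0s_1s(seq):
--     """
--     This is a helping function that counts the number of 1s and 0s in even and odd positions of the sequence
--
--         Parameter(s):
--               seq: array of binary values
--
--         Return(s):
--               count_of_0_even_pos (int): represents the number of 0s in even positions in the sequence
--               count_of_0_odd_pos (int): represents the number of 0s in odd positions in the sequence
--               count_of_1_even_pos (int): represents the number of 1s in even positions in the sequence
--               count_of_1_odd_pos (int): represents the number of 1s in odd positions in the sequence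
--     """
--     length_of_seq = len(seq)
--     count_of_0_even_pos = 0
--     count_of_0_odd_pos = 0
--     count_of_1_even_pos = 0
--     count_of_1_odd_pos = 0
--     for y in range(length_of_seq):
--         if y % 2 == 0:
--             if seq[y] == 0:
--                 count_of_0_even_pos += 1
--             else:
--                 count_of_1_even_pos += 1
--         else:
--             if seq[y] == 0:
--                 count_of_0_odd_pos += 1
--             else:
--                 count_of_1_odd_pos += 1
--     return count_of_0_even_pos, count_of_1_even_pos, count_of_0_odd_pos, count_of_1_odd_pos
-- ===== SOURCE B (Python) =====
-- def count_even_odd_0s_1s(seq):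
--     even = seq[0::2]
--     odd = seq[1::2]
--     zeros_even = sum(1 for x in even if x == 0)
--     zeros_odd = sum(1 for x in odd if x == 0)
--     return zeros_even, len(even) - zeros_even, zeros_odd, len(odd) - zeros_odd
-- ===== Notes on version B (the rewrite author's own statement) =====
-- stated objective: simpler
-- what changed: Replaces the indexed loop with per-element parity tests by slicing the sequence into even/odd-position subsequences and counting zeros in each (ones = length - zeros).
import Mathlib
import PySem

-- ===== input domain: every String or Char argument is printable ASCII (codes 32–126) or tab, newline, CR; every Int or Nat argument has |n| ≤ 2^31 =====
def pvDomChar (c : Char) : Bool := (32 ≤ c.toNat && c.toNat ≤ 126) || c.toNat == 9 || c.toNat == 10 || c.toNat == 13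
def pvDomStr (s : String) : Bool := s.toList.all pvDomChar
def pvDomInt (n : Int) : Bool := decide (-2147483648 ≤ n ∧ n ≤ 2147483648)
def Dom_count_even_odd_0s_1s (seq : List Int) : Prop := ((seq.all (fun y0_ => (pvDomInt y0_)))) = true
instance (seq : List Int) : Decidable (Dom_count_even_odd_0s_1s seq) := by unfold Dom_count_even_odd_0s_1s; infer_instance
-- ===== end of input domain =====

-- B replaces the indexed loop with parity tests by slicing into even/odd-position subsequences and counting zeros (simpler decomposition, same cost).

-- ===== PORT A =====
-- loop body of A's for-loop (literal)
def pvStepA (seq : List Int) (s : Int × Int × Int × Int) (y : Int) : Int × Int × Int × Int :=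
  if PySem.Int.mod y 2 = 0 then
    if PySem.List.pyGetD seq y 0 = 0 then (s.1 + 1, s.2.1, s.2.2.1, s.2.2.2)
    else (s.1, s.2.1 + 1, s.2.2.1, s.2.2.2)
  else
    if PySem.List.pyGetD seq y 0 = 0 then (s.1, s.2.1, s.2.2.1 + 1, s.2.2.2)
    else (s.1, s.2.1, s.2.2.1, s.2.2.2 + 1)

def count_even_odd_0s_1s (seq : List Int) : Int × Int × Int × Int :=
  let length_of_seq := PySem.List.len seq
  (PySem.List.pyRange 0 length_of_seq 1).foldl (pvStepA seq) (0, 0, 0, 0)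

-- ===== PORT B =====
def count_even_odd_0s_1s_alt (seq : List Int) : Int × Int × Int × Int :=
  let even := (PySem.List.slice? seq (some 0) none 2).getD []
  let odd := (PySem.List.slice? seq (some 1) none 2).getD []
  let zeros_even := (even.map (fun x => if x = 0 then (1 : Int) else 0)).sum
  let zeros_odd := (odd.map (fun x => if x = 0 then (1 : Int) else 0)).sum
  (zeros_even, PySem.List.len even - zeros_even, zeros_odd, PySem.List.len odd - zeros_odd)

-- ===== PRECONDITION & SPEC =====
def Spec_count_even_odd_0s_1s (seq : List Int) (out : Int × Int × Int × Int) : Prop := out = count_even_odd_0s_1s_alt seq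
instance (seq : List Int) (out : Int × Int × Int × Int) : Decidable (Spec_count_even_odd_0s_1s seq out) := by unfold Spec_count_even_odd_0s_1s; infer_instance

-- ===== CLAIM (what is proved, stated in full; the proofs are below) =====
def Claim_equal_count_even_odd_0s_1s : Prop := ∀ (seq : List Int), Dom_count_even_odd_0s_1s seq → Spec_count_even_odd_0s_1s seq (count_even_odd_0s_1s seq)

-- ===== LEMMAS AND PROOFS =====

-- elements at even / odd positions
def pvEvens : List Int → List Int
  | [] => []
  | [a] => [a]
  | a :: _ :: r => a :: pvEvens r

def pvOdds : List Int → List Int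
  | [] => []
  | _ :: r => pvEvens r

def pvAdd4 (u v : Int × Int × Int × Int) : Int × Int × Int × Int :=
  (u.1 + v.1, u.2.1 + v.2.1, u.2.2.1 + v.2.2.1, u.2.2.2 + v.2.2.2)

def pvDelta (a b : Int) : Int × Int × Int × Int :=
  ((if a = 0 then 1 else 0), (if a = 0 then 0 else 1), (if b = 0 then 1 else 0), (if b = 0 then 0 else 1))

def pvCZ (l : List Int) : Int := (l.map (fun x => if x = 0 then (1 : Int) else 0)).sum

-- core: the index list produced by slicing with step 2 picks out the even positions
theorem pvFmE : ∀ xs : List Int,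
    List.filterMap (fun k => xs[2 * k]?) (List.range ((xs.length + 1) / 2)) = pvEvens xs := by
  intro xs
  induction xs using pvEvens.induct with
  | case1 => simp [pvEvens]
  | case2 a => simp [pvEvens]
  | case3 a b r ih =>
    have hc : ((a :: b :: r).length + 1) / 2 = (r.length + 1) / 2 + 1 := by
      simp [List.length_cons]; omega
    rw [hc, List.range_succ_eq_map, List.filterMap_cons, List.filterMap_map]
    have h0 : (a :: b :: r)[2 * 0]? = some a := by simp
    rw [h0]
    have hf : ((fun k => (a :: b :: r)[2 * k]?) ∘ Nat.succ) = fun k => r[2 * k]? := by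
      funext k
      have : 2 * Nat.succ k = 2 * k + 1 + 1 := by omega
      simp [Function.comp, this]
    rw [hf, ih]
    rfl

theorem pvSliceE (xs : List Int) :
    PySem.List.slice? xs (some 0) none 2 = some (pvEvens xs) := by
  rw [← pvFmE xs]
  unfold PySem.List.slice? PySem.List.sliceIndices
  norm_num
  have hC : (if 0 < xs.length then (((xs.length : Int) + 2 - 1) / 2).toNat else 0)
      = (xs.length + 1) / 2 := by
    split_ifs <;> omega
  rw [hC]
  refine List.filterMap_congr (fun k _ => ?_)
  have hidx : (2 * (k : Int)).toNat = 2 * k := by omega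
  rw [hidx]

theorem pvEvensCons (b : Int) (r : List Int) : pvEvens (b :: r) = b :: pvOdds r := by
  cases r <;> rfl

theorem pvSliceO (xs : List Int) :
    PySem.List.slice? xs (some 1) none 2 = some (pvOdds xs) := by
  unfold PySem.List.slice? PySem.List.sliceIndices
  norm_num
  rcases xs with _ | ⟨a, r⟩
  · simp [pvOdds]
  · have hn : (a :: r).length = r.length + 1 := by simp
    rw [show pvOdds (a :: r) = pvEvens r from rfl, ← pvFmE r]
    have hC : (if 1 < (a :: r).length then
          (((((a :: r).length : Int)) - min 1 ((a :: r).length : Int) + 2 - 1) / 2).toNat else 0)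
        = (r.length + 1) / 2 := by
      split_ifs <;> omega
    rw [hC]
    refine List.filterMap_congr (fun k _ => ?_)
    have hidx : (min 1 (((a :: r).length : Int)) + 2 * (k : Int)).toNat = 2 * k + 1 := by omega
    rw [hidx]
    simp

theorem pvStepA_add (seq : List Int) (s : Int × Int × Int × Int) (y : Int) :
    pvStepA seq s y = pvAdd4 s (pvStepA seq (0, 0, 0, 0) y) := by
  unfold pvStepA pvAdd4
  split_ifs <;> simp

theorem pvFoldlA_add (seq : List Int) (l : List Int) :
    ∀ acc, l.foldl (pvStepA seq) acc = pvAdd4 acc (l.foldl (pvStepA seq) (0, 0, 0, 0)) := by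
  induction l with
  | nil => intro acc; simp [pvAdd4]
  | cons y l ih =>
    intro acc
    simp only [List.foldl_cons]
    rw [ih (pvStepA seq acc y), ih (pvStepA seq (0, 0, 0, 0) y), pvStepA_add seq acc y]
    simp [pvAdd4, add_assoc]

theorem pvShiftA (a b : Int) (r : List Int) :
    (PySem.List.pyRange 2 (PySem.List.len r + 2) 1).foldl (pvStepA (a :: b :: r)) (0, 0, 0, 0)
      = (PySem.List.pyRange 0 (PySem.List.len r) 1).foldl (pvStepA r) (0, 0, 0, 0) := by
  rw [PySem.List.pyRange_one, PySem.List.pyRange_one]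
  have h1 : (PySem.List.len r + 2 - 2).toNat = r.length := by
    simp [PySem.List.len_eq]
  have h2 : (PySem.List.len r - 0).toNat = r.length := by
    simp [PySem.List.len_eq]
  rw [h1, h2, List.foldl_map, List.foldl_map]
  have hfun : (fun (acc : Int × Int × Int × Int) (k : Nat) => pvStepA (a :: b :: r) acc (2 + (k : Int)))
      = (fun (acc : Int × Int × Int × Int) (k : Nat) => pvStepA r acc (0 + (k : Int))) := by
    funext acc k
    unfold pvStepA
    have hm : PySem.Int.mod (2 + (k : Int)) 2 = PySem.Int.mod (0 + (k : Int)) 2 := by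
      simp only [PySem.Int.mod_eq_emod_of_pos (show (0:Int) < 2 by norm_num)]
      omega
    have hg : PySem.List.pyGetD (a :: b :: r) (2 + (k : Int)) 0 = PySem.List.pyGetD r (0 + (k : Int)) 0 := by
      have e1 : (2 + (k : Int)) = ((k + 1 + 1 : Nat) : Int) := by push_cast; ring
      have e2 : (0 + (k : Int)) = ((k : Nat) : Int) := by simp
      rw [e1, e2, PySem.List.pyGetD_natCast, PySem.List.pyGetD_natCast]
      rfl
    rw [hm, hg]
  rw [hfun]

theorem pvA_nil : count_even_odd_0s_1s [] = (0, 0, 0, 0) := by decide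

theorem pvGetD_one (a b : Int) (r : List Int) : PySem.List.pyGetD (a :: b :: r) 1 0 = b := by
  have e : (1 : Int) = ((1 : Nat) : Int) := rfl
  rw [e, PySem.List.pyGetD_natCast]
  rfl

theorem pvA_one (a : Int) :
    count_even_odd_0s_1s [a] = (if a = 0 then ((1 : Int), (0 : Int), (0 : Int), (0 : Int)) else (0, 1, 0, 0)) := by
  show List.foldl (pvStepA [a]) (0, 0, 0, 0) (PySem.List.pyRange 0 (PySem.List.len [a]) 1) = _
  have hl : PySem.List.len [a] = 1 := by simp [PySem.List.len_eq]
  have hr : PySem.List.pyRange 0 (1 : Int) 1 = [0] := by decide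
  rw [hl, hr]
  simp only [List.foldl_cons, List.foldl_nil]
  unfold pvStepA
  have hm : PySem.Int.mod 0 2 = 0 := by decide
  rw [hm]
  simp only [PySem.List.pyGetD_zero_cons]
  split_ifs <;> rfl

theorem pvA_cons2 (a b : Int) (r : List Int) :
    count_even_odd_0s_1s (a :: b :: r) = pvAdd4 (pvDelta a b) (count_even_odd_0s_1s r) := by
  show List.foldl (pvStepA (a :: b :: r)) (0, 0, 0, 0)
      (PySem.List.pyRange 0 (PySem.List.len (a :: b :: r)) 1) = _
  have hlen : PySem.List.len (a :: b :: r) = PySem.List.len r + 2 := by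
    simp [PySem.List.len_eq]; ring
  have hpos : (0 : Int) ≤ PySem.List.len r := by simp [PySem.List.len_eq]
  have hx : PySem.List.pyRange 0 (PySem.List.len r + 2) 1
      = 0 :: 1 :: PySem.List.pyRange 2 (PySem.List.len r + 2) 1 := by
    rw [PySem.List.pyRange_one_cons (by omega), PySem.List.pyRange_one_cons (by omega)]
    norm_num
  rw [hlen, hx]
  simp only [List.foldl_cons]
  rw [pvFoldlA_add, pvShiftA]
  have hacc : pvStepA (a :: b :: r) (pvStepA (a :: b :: r) (0, 0, 0, 0) 0) 1 = pvDelta a b := by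
    unfold pvStepA pvDelta
    have hm0 : PySem.Int.mod 0 2 = 0 := by decide
    have hm1 : PySem.Int.mod 1 2 = 1 := by decide
    rw [hm0, hm1]
    norm_num [PySem.List.pyGetD_zero_cons, pvGetD_one]
    split_ifs <;> norm_num
  rw [hacc]
  rfl

theorem pvB_eq (xs : List Int) :
    count_even_odd_0s_1s_alt xs =
      (pvCZ (pvEvens xs), ((pvEvens xs).length : Int) - pvCZ (pvEvens xs),
       pvCZ (pvOdds xs), ((pvOdds xs).length : Int) - pvCZ (pvOdds xs)) := by
  unfold count_even_odd_0s_1s_alt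
  rw [pvSliceE, pvSliceO]
  simp [pvCZ, PySem.List.len_eq]

theorem pvB_cons2 (a b : Int) (r : List Int) :
    count_even_odd_0s_1s_alt (a :: b :: r) = pvAdd4 (pvDelta a b) (count_even_odd_0s_1s_alt r) := by
  rw [pvB_eq, pvB_eq]
  have he : pvEvens (a :: b :: r) = a :: pvEvens r := rfl
  have ho : pvOdds (a :: b :: r) = b :: pvOdds r := by
    show pvEvens (b :: r) = b :: pvOdds r
    exact pvEvensCons b r
  rw [he, ho]
  simp only [pvCZ, List.map_cons, List.sum_cons, List.length_cons, pvAdd4, pvDelta]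
  split_ifs <;> simp only [Prod.mk.injEq] <;> refine ⟨?_, ?_, ?_, ?_⟩ <;> push_cast <;> ring

theorem pvMain : ∀ xs : List Int, count_even_odd_0s_1s xs = count_even_odd_0s_1s_alt xs := by
  have key : ∀ (n : Nat) (xs : List Int), xs.length ≤ n →
      count_even_odd_0s_1s xs = count_even_odd_0s_1s_alt xs := by
    intro n
    induction n with
    | zero =>
      intro xs h
      have : xs = [] := by cases xs <;> simp_all
      subst this
      rw [pvA_nil, pvB_eq]
      simp [pvEvens, pvOdds, pvCZ]
    | succ n ih =>
      intro xs h
      match xs with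
      | [] =>
        rw [pvA_nil, pvB_eq]
        simp [pvEvens, pvOdds, pvCZ]
      | [a] =>
        rw [pvA_one, pvB_eq]
        simp only [pvEvens, pvOdds, pvCZ]
        by_cases hA : a = 0 <;> simp [hA]
      | a :: b :: r =>
        rw [pvA_cons2, pvB_cons2, ih r (by simp at h; omega)]
  intro xs
  exact key xs.length xs le_rfl

-- ===== VERDICT (by name: the statement is the Claim_ definition above) =====
theorem count_even_odd_0s_1s_spec : Claim_equal_count_even_odd_0s_1s := by
  intro seq _
  unfold Spec_count_even_odd_0s_1s
  exact pvMain seq
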